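-- pv_equiv track=rewrite | github.com/PawelManczak/Master-thesis | second part/source/experiments/dataset_comparison/compare_datasets.py | compare_pattern_sets
-- ===== SOURCE A (Python) =====
-- from typing import Dict, List, Set, Tuple
--
-- def compare_pattern_sets(patterns_dict: Dict[str, Set[str]]) -> Dict[str, Set[str]]:
--     """Compares pattern sets between datasets."""
--     datasets = list(patterns_dict.keys())
--     result = {}
--
--     # Common for all
--     if len(datasets) >= 2:
--         common_all = patterns_dict[datasets[0]].copy()
--         for ds in datasets[1:]:
--             common_all &= patterns_dict[ds]
--         result['common_all'] = common_all
--
--     # Common for at least 3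
--     if len(datasets) >= 3:
--         all_items = set().union(*patterns_dict.values())
--         common_3_plus = set()
--         for item in all_items:
--             count = sum(1 for ds in datasets if item in patterns_dict[ds])
--             if count >= 3:
--                 common_3_plus.add(item)
--         result['common_3_plus'] = common_3_plus
--
--     # Common for pairs
--     for i, ds1 in enumerate(datasets):
--         for ds2 in datasets[i+1:]:
--             key = f"common_{ds1}_{ds2}"
--             common = patterns_dict[ds1] & patterns_dict[ds2]
--             result[key] = common
--
--     # Unique per dataset
--     for ds in datasets:
--         others = set()
--         for other_ds in datasets:
--             if other_ds != ds:
--                 others |= patterns_dict[other_ds]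
--         result[f"unique_{ds}"] = patterns_dict[ds] - others
--
--     return result
-- ===== SOURCE B (Python) =====
-- def compare_pattern_sets(patterns_dict):
--     """Compares pattern sets between datasets (occurrence-count recast)."""
--     datasets = list(patterns_dict.keys())
--     n = len(datasets)
--
--     # one counting pass: how many datasets contain each item
--     counts = {}
--     for ds in datasets:
--         for item in patterns_dict[ds]:
--             counts[item] = counts.get(item, 0) + 1
--
--     result = {}
--
--     if n >= 2:
--         result['common_all'] = {item for item, c in counts.items() if c == n}
--
--     if n >= 3:
--         result['common_3_plus'] = {item for item, c in counts.items() if c >= 3}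
--
--     for i, ds1 in enumerate(datasets):
--         for ds2 in datasets[i + 1:]:
--             result[f"common_{ds1}_{ds2}"] = patterns_dict[ds1] & patterns_dict[ds2]
--
--     for ds in datasets:
--         result[f"unique_{ds}"] = {item for item in patterns_dict[ds] if counts[item] == 1}
--
--     return result
-- ===== Notes on version B (the rewrite author's own statement) =====
-- stated objective: simpler
-- what changed: B builds one occurrence-count dict over all pattern sets in a single pass and derives common_all (count==len), common_3_plus (count>=3) and every unique_<ds> (count==1) from it, replacing A's chained set intersections, per-item membership rescans and per-dataset union-of-others subtractions; the pairwise-intersection loop is kept.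
import Mathlib
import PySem

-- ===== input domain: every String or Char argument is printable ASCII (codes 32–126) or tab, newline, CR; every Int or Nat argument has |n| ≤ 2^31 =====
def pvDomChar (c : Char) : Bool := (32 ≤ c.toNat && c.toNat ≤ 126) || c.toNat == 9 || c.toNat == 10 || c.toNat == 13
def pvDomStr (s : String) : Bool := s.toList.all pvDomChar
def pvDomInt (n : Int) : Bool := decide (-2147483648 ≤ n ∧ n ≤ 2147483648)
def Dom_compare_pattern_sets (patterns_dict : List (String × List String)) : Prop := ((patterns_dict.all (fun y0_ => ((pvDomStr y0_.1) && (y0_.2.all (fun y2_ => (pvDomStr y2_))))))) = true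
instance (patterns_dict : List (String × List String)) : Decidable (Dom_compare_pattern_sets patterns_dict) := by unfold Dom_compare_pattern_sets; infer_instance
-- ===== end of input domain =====

-- B replaces A's chained intersections, per-item membership rescans and union-of-others subtractions
-- by one occurrence-count dict built in a single pass (objective: simpler).

-- ===== PORT A =====
def compare_pattern_sets (patterns_dict : List (String × List String)) : List (String × List String) :=
  let d : PySem.Dict String (List String) := PySem.Dict.mk patterns_dict
  let datasets := d.keys
  let result : PySem.Dict String (List String) := PySem.Dict.empty
  -- Common for all
  let result :=
    if 2 ≤ datasets.length then
      let common_all :=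
        datasets.tail.foldl (fun acc ds => PySem.Set.inter acc (d.getD ds []))
          (d.getD (datasets.headD "") [])
      result.insert "common_all" common_all
    else result
  -- Common for at least 3
  let result :=
    if 3 ≤ datasets.length then
      let all_items := d.values.foldl (fun s v => PySem.Set.union s v) PySem.Set.empty
      let common_3_plus :=
        all_items.foldl (fun s item =>
          let count := (datasets.map (fun ds =>
            if PySem.Set.contains (d.getD ds []) item then (1 : Int) else 0)).sum
          if 3 ≤ count then PySem.Set.add s item else s) PySem.Set.empty
      result.insert "common_3_plus" common_3_plus
    else result
  -- Common for pairs
  let result :=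
    (PySem.List.enumerate datasets).foldl (fun r p =>
      (PySem.List.slice datasets (some (p.1 + 1)) none).foldl (fun r ds2 =>
        r.insert ("common_" ++ p.2 ++ "_" ++ ds2)
          (PySem.Set.inter (d.getD p.2 []) (d.getD ds2 []))) r) result
  -- Unique per dataset
  let result :=
    datasets.foldl (fun r ds =>
      let others := datasets.foldl (fun o other_ds =>
        if other_ds ≠ ds then PySem.Set.union o (d.getD other_ds []) else o) PySem.Set.empty
      r.insert ("unique_" ++ ds) (PySem.Set.diff (d.getD ds []) others)) result
  result.items

-- ===== PORT B =====
def compare_pattern_sets_alt (patterns_dict : List (String × List String)) : List (String × List String) :=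
  let d : PySem.Dict String (List String) := PySem.Dict.mk patterns_dict
  let datasets := d.keys
  let n := datasets.length
  -- one counting pass: how many datasets contain each item
  let counts : PySem.Dict String Int :=
    datasets.foldl (fun c ds =>
      (d.getD ds []).foldl (fun c item => c.modify item 0 (· + 1)) c) PySem.Dict.empty
  let result : PySem.Dict String (List String) := PySem.Dict.empty
  let result :=
    if 2 ≤ n then
      result.insert "common_all"
        (PySem.Set.ofList ((counts.items.filter (fun p => p.2 == (n : Int))).map (·.1)))
    else result
  let result :=
    if 3 ≤ n then
      result.insert "common_3_plus"
        (PySem.Set.ofList ((counts.items.filter (fun p => decide ((3 : Int) ≤ p.2))).map (·.1)))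
    else result
  let result :=
    (PySem.List.enumerate datasets).foldl (fun r p =>
      (PySem.List.slice datasets (some (p.1 + 1)) none).foldl (fun r ds2 =>
        r.insert ("common_" ++ p.2 ++ "_" ++ ds2)
          (PySem.Set.inter (d.getD p.2 []) (d.getD ds2 []))) r) result
  let result :=
    datasets.foldl (fun r ds =>
      r.insert ("unique_" ++ ds)
        (PySem.Set.ofList ((d.getD ds []).filter (fun item => counts.getD item 0 == 1)))) result
  result.items

-- ===== PRECONDITION & SPEC =====
-- Pre_ admits exactly the association lists that encode a Python dict of sets (the declared
-- argument type dict[str, set[str]]): keys pairwise distinct and each value list duplicate-free;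
-- other lists correspond to no Python input of A.
def Pre_compare_pattern_sets (patterns_dict : List (String × List String)) : Prop :=
  (patterns_dict.map (·.1)).Nodup ∧ ∀ p ∈ patterns_dict, p.2.Nodup
instance (patterns_dict : List (String × List String)) : Decidable (Pre_compare_pattern_sets patterns_dict) := by unfold Pre_compare_pattern_sets; infer_instance
def pvWitness_compare_pattern_sets : (List (String × List String)) :=
  [("a", ["p", "q"]), ("b", ["q", "r"]), ("c", ["q", "s"])]
def Spec_compare_pattern_sets (patterns_dict : List (String × List String)) (out : List (String × List String)) : Prop := out = compare_pattern_sets_alt patterns_dict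
instance (patterns_dict : List (String × List String)) (out : List (String × List String)) : Decidable (Spec_compare_pattern_sets patterns_dict out) := by unfold Spec_compare_pattern_sets; infer_instance

-- ===== CLAIM (what is proved, stated in full; the proofs are below) =====
def Claim_equal_compare_pattern_sets : Prop := ∀ (patterns_dict : List (String × List String)), Dom_compare_pattern_sets patterns_dict → Pre_compare_pattern_sets patterns_dict → Spec_compare_pattern_sets patterns_dict (compare_pattern_sets patterns_dict)

-- ===== LEMMAS AND PROOFS =====

def pvV (pd : List (String × List String)) (k : String) : List String :=
  (PySem.Dict.mk pd).getD k []
def pvKeys (pd : List (String × List String)) : List String := pd.map (·.1)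
def pvL (pd : List (String × List String)) : List String :=
  ((pvKeys pd).map (pvV pd)).flatten
def pvCnt (pd : List (String × List String)) (x : String) : Nat :=
  (pvKeys pd).countP (fun ds => (pvV pd ds).contains x)

theorem pv_lookup (pd : List (String × List String)) (hk : (pd.map (·.1)).Nodup)
    {p : String × List String} (hp : p ∈ pd) : pvV pd p.1 = p.2 := by
  unfold pvV
  apply PySem.Dict.getD_of_mem_items (PySem.Dict.mk pd) (k := p.1) (v := p.2)
  · simpa using hp
  · simpa [PySem.Dict.keys] using hk

theorem pv_mapV (pd : List (String × List String)) (hk : (pd.map (·.1)).Nodup) :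
    (pvKeys pd).map (pvV pd) = pd.map (·.2) := by
  unfold pvKeys
  rw [List.map_map]
  exact List.map_congr_left (fun p hp => pv_lookup pd hk hp)

theorem pv_nodupV (pd : List (String × List String)) (hv : ∀ p ∈ pd, p.2.Nodup)
    (k : String) : (pvV pd k).Nodup := by
  unfold pvV
  rw [PySem.Dict.getD_eq_get?_getD]
  cases h : (PySem.Dict.mk pd).get? k with
  | none => simp
  | some v =>
    have := PySem.Dict.mem_items_of_get?_eq_some _ h
    simpa using hv _ (by simpa using this)

theorem pv_countL (pd : List (String × List String)) (hv : ∀ p ∈ pd, p.2.Nodup)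
    (x : String) : (pvL pd).count x = pvCnt pd x := by
  unfold pvL pvCnt
  rw [List.count_flatten, List.map_map]
  induction pvKeys pd with
  | nil => simp
  | cons hd tl ih =>
    simp only [List.map_cons, List.sum_cons, List.countP_cons, ih, Function.comp]
    by_cases hm : x ∈ pvV pd hd
    · rw [List.count_eq_one_of_mem (pv_nodupV pd hv hd) hm]
      simp [hm]
      omega
    · rw [List.count_eq_zero_of_not_mem hm]
      simp [hm]

-- chained intersection is one filter by membership in all
theorem pv_foldl_inter (V : String → List String) (l : List String) (s : List String) :
    l.foldl (fun acc ds => PySem.Set.inter acc (V ds)) s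
      = s.filter (fun x => l.all (fun ds => (V ds).contains x)) := by
  induction l generalizing s with
  | nil => simp
  | cons hd tl ih =>
    rw [List.foldl_cons, ih]
    show (List.filter _ s).filter _ = _
    rw [List.filter_filter]
    exact List.filter_congr (fun x _ => by simp [Bool.and_comm])

-- selective Set.add fold from a clean prefix is append-filter
theorem pv_foldl_add (p : String → Prop) [DecidablePred p] (l : List String) (s : List String)
    (h : (s ++ l).Nodup) :
    l.foldl (fun s x => if p x then PySem.Set.add s x else s) s
      = s ++ l.filter (fun x => decide (p x)) := by
  induction l generalizing s with
  | nil => simp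
  | cons hd tl ih =>
    have hnd : ((s ++ [hd]) ++ tl).Nodup := by simpa using h
    have hhd : hd ∉ s := by
      intro hm
      have := List.Nodup.disjoint (l₁ := s) (l₂ := hd :: tl) (by simpa using h)
      exact this hm (by simp)
    rw [List.foldl_cons]
    by_cases hp : p hd
    · rw [if_pos hp, PySem.Set.add_of_not_mem hhd, ih _ hnd]
      simp [hp]
    · rw [if_neg hp]
      have hnd' : (s ++ tl).Nodup := by
        have := List.Nodup.sublist (l₁ := s ++ tl) (l₂ := (s ++ [hd]) ++ tl) (by
          simpa using List.Sublist.append_left (List.sublist_append_left _ _) _) hnd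
        exact this
      rw [ih _ hnd']
      simp [hp]

-- membership in the "others" union fold
theorem pv_mem_foldl_others (V : String → List String) (ds : String)
    (l : List String) (s : List String) (x : String) :
    x ∈ l.foldl (fun o other => if other ≠ ds then PySem.Set.union o (V other) else o) s
      ↔ x ∈ s ∨ ∃ other ∈ l, other ≠ ds ∧ x ∈ V other := by
  induction l generalizing s with
  | nil => simp
  | cons hd tl ih =>
    rw [List.foldl_cons]
    by_cases hne : hd ≠ ds
    · rw [if_pos hne, ih]
      unfold PySem.Set.union
      rw [PySem.Set.mem_update]
      constructor
      · rintro (⟨h | h⟩ | h)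
        · exact Or.inl h
        · exact Or.inr ⟨hd, by simp, hne, h⟩
        · obtain ⟨o, ho, h1, h2⟩ := h
          exact Or.inr ⟨o, by simp [ho], h1, h2⟩
      · rintro (h | ⟨o, ho, h1, h2⟩)
        · exact Or.inl (Or.inl h)
        · rcases List.mem_cons.mp ho with rfl | ho'
          · exact Or.inl (Or.inr h2)
          · exact Or.inr ⟨o, ho', h1, h2⟩
    · rw [if_neg hne]
      rw [ih]
      constructor
      · rintro (h | ⟨o, ho, h1, h2⟩)
        · exact Or.inl h
        · exact Or.inr ⟨o, by simp [ho], h1, h2⟩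
      · rintro (h | ⟨o, ho, h1, h2⟩)
        · exact Or.inl h
        · rcases List.mem_cons.mp ho with rfl | ho'
          · exact absurd h1 hne
          · exact Or.inr ⟨o, ho', h1, h2⟩

-- the nested counting loop of B is Counter of the flattened values
theorem pv_counts_eq (pd : List (String × List String)) :
    ((PySem.Dict.mk pd).keys).foldl (fun c ds =>
        ((PySem.Dict.mk pd).getD ds []).foldl
          (fun c item => c.modify item 0 (· + 1)) c) PySem.Dict.empty
      = PySem.Dict.counter (pvL pd) := by
  rw [PySem.Dict.counter_eq_foldl]
  unfold pvL
  rw [List.foldl_flatten, List.foldl_map]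
  rfl

-- B's set comprehension over Counter items, normalised to a filter of the dedup list
theorem pv_comp_counter (xs : List String) (qp : String × Int → Bool) :
    PySem.Set.ofList ((((PySem.Dict.counter xs).items).filter qp).map (·.1))
      = (PySem.Set.ofList xs).filter (fun k => qp (k, (xs.count k : Int))) := by
  rw [PySem.Dict.items_counter, List.filter_map, List.map_map]
  have h1 : ((fun p : String × Int => p.1) ∘ fun k => (k, (xs.count k : Int))) = id := rfl
  rw [h1, List.map_id]
  exact PySem.Set.ofList_eq_self_of_nodup _
    ((PySem.Set.nodup_ofList xs).filter _)

-- common_all: the chained intersection equals B's count-==-n comprehension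
theorem pv_common_all (pd : List (String × List String))
    (hv : ∀ p ∈ pd, p.2.Nodup) (hlen : 2 ≤ (pvKeys pd).length) :
    (pvKeys pd).tail.foldl (fun acc ds => PySem.Set.inter acc (pvV pd ds))
        (pvV pd ((pvKeys pd).headD ""))
      = PySem.Set.ofList ((((PySem.Dict.counter (pvL pd)).items).filter
          (fun p => p.2 == ((pvKeys pd).length : Int))).map (·.1)) := by
  obtain ⟨k0, rest, hcons⟩ : ∃ k0 rest, pvKeys pd = k0 :: rest := by
    cases h : pvKeys pd with
    | nil => rw [h] at hlen; simp at hlen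
    | cons a b => exact ⟨a, b, rfl⟩
  have hL : pvL pd = pvV pd k0 ++ (rest.map (pvV pd)).flatten := by
    unfold pvL; rw [hcons]; simp
  have hcnt : ∀ x, (pvL pd).count x = (pvKeys pd).countP (fun ds => (pvV pd ds).contains x) :=
    pv_countL pd hv
  have hR : PySem.Set.ofList ((((PySem.Dict.counter (pvL pd)).items).filter
          (fun p => p.2 == ((pvKeys pd).length : Int))).map (·.1))
      = (PySem.Set.ofList (pvL pd)).filter
          (fun k => ((pvL pd).count k : Int) == ((pvKeys pd).length : Int)) := by
    rw [pv_comp_counter]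
  rw [hR]
  have hsplit : PySem.Set.ofList (pvL pd)
      = pvV pd k0 ++ ((PySem.Set.ofList ((rest.map (pvV pd)).flatten)).filter
          (fun y => !(pvV pd k0).contains y)) := by
    rw [hL, PySem.Set.ofList_append,
        PySem.Set.ofList_eq_self_of_nodup _ (pv_nodupV pd hv k0),
        PySem.Set.update_eq_append_filter]
    exact rfl
  rw [hsplit, List.filter_append]
  have hnil : (((PySem.Set.ofList ((rest.map (pvV pd)).flatten)).filter
      (fun y => !(pvV pd k0).contains y)).filter
        (fun k => ((pvL pd).count k : Int) == ((pvKeys pd).length : Int))) = [] := by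
    rw [List.filter_eq_nil_iff]
    intro x hx
    rw [List.mem_filter] at hx
    obtain ⟨-, hnc⟩ := hx
    intro hq
    have hq' : (pvL pd).count x = (pvKeys pd).length := by
      have := beq_iff_eq.mp hq
      exact_mod_cast this
    rw [hcnt] at hq'
    have hall := List.countP_eq_length.mp hq'
    have hmem := hall k0 (by rw [hcons]; simp)
    rw [Bool.not_eq_eq_eq_not, Bool.not_true] at hnc
    rw [hmem] at hnc
    cases hnc
  rw [hnil, List.append_nil]
  rw [hcons]
  show (rest.foldl (fun acc ds => PySem.Set.inter acc (pvV pd ds)) (pvV pd k0)) = _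
  rw [pv_foldl_inter]
  apply List.filter_congr
  intro x hx
  have hk0 : (pvV pd k0).contains x = true := by
    simpa [PySem.Set.contains_iff] using hx
  have hcx : (pvL pd).count x = (rest.countP (fun ds => (pvV pd ds).contains x)) + 1 := by
    rw [hcnt, hcons, List.countP_cons, hk0]
    simp
  rw [Bool.eq_iff_iff, List.all_eq_true]
  simp only [beq_iff_eq, hcx, List.length_cons]
  rw [Int.natCast_inj]
  constructor
  · intro h
    have : rest.countP (fun ds => (pvV pd ds).contains x) = rest.length :=
      List.countP_eq_length.mpr (fun a ha => h a ha)
    omega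
  · intro h
    exact List.countP_eq_length.mp (by omega)

-- common_3_plus: A's rescanning fold equals B's count-≥-3 comprehension
theorem pv_c3 (pd : List (String × List String)) (hk : (pd.map (·.1)).Nodup)
    (hv : ∀ p ∈ pd, p.2.Nodup) :
    ((pd.map (·.2)).foldl (fun s v => PySem.Set.union s v) PySem.Set.empty).foldl
        (fun s item =>
          if (3 : Int) ≤ ((pvKeys pd).map (fun ds =>
              if (pvV pd ds).contains item then (1 : Int) else 0)).sum
          then PySem.Set.add s item else s) PySem.Set.empty
      = PySem.Set.ofList ((((PySem.Dict.counter (pvL pd)).items).filter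
          (fun p => decide ((3 : Int) ≤ p.2))).map (·.1)) := by
  have hVals : pd.map (·.2) = (pvKeys pd).map (pvV pd) := (pv_mapV pd hk).symm
  rw [hVals]
  have hAll : ((pvKeys pd).map (pvV pd)).foldl (fun s v => PySem.Set.union s v) PySem.Set.empty
      = PySem.Set.ofList (pvL pd) := by
    unfold pvL
    rw [PySem.Set.ofList_eq_foldl, List.foldl_flatten]
    rfl
  rw [hAll]
  rw [pv_foldl_add (fun item => (3 : Int) ≤ ((pvKeys pd).map (fun ds =>
        if (pvV pd ds).contains item then (1 : Int) else 0)).sum)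
      (PySem.Set.ofList (pvL pd)) PySem.Set.empty
      (by simpa [PySem.Set.empty] using PySem.Set.nodup_ofList (pvL pd))]
  rw [show ∀ l : List String, (PySem.Set.empty : PySem.Set String) ++ l = l from fun l => rfl]
  rw [pv_comp_counter]
  apply List.filter_congr
  intro x _
  have hsum : ((pvKeys pd).map (fun ds =>
      if (pvV pd ds).contains x then (1 : Int) else 0)).sum
      = (((pvKeys pd).countP (fun ds => (pvV pd ds).contains x) : Nat) : Int) :=
    PySem.List.sum_map_ite_one_zero _ _
  have hc : ((pvKeys pd).countP (fun ds => (pvV pd ds).contains x) : Int)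
      = ((pvL pd).count x : Int) := by
    have h := (pv_countL pd hv x).symm
    unfold pvCnt at h
    exact_mod_cast h
  rw [hsum, hc]

-- unique_ds: subtracting the union of the others equals B's count-==-1 comprehension
theorem pv_unique (pd : List (String × List String)) (hk : (pd.map (·.1)).Nodup)
    (hv : ∀ p ∈ pd, p.2.Nodup) {ds : String} (hds : ds ∈ pvKeys pd) :
    PySem.Set.diff (pvV pd ds)
        ((pvKeys pd).foldl (fun o other_ds =>
          if other_ds ≠ ds then PySem.Set.union o (pvV pd other_ds) else o) PySem.Set.empty)
      = PySem.Set.ofList ((pvV pd ds).filter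
          (fun item => (PySem.Dict.counter (pvL pd)).getD item 0 == 1)) := by
  have hkeys : (pvKeys pd).Nodup := hk
  have hRnodup : ((pvV pd ds).filter
      (fun item => (PySem.Dict.counter (pvL pd)).getD item 0 == 1)).Nodup :=
    (pv_nodupV pd hv ds).filter _
  rw [PySem.Set.ofList_eq_self_of_nodup _ hRnodup]
  unfold PySem.Set.diff
  apply List.filter_congr
  intro x hx
  rw [Bool.eq_iff_iff, Bool.not_eq_eq_eq_not, Bool.not_true, ← Bool.not_eq_true,
      PySem.Set.contains_iff, pv_mem_foldl_others, PySem.Dict.getD_counter, beq_iff_eq]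
  have hcx : (pvL pd).count x = (pvKeys pd).countP (fun o => (pvV pd o).contains x) :=
    pv_countL pd hv x
  have hperm : (pvKeys pd).Perm (ds :: (pvKeys pd).erase ds) := List.perm_cons_erase hds
  have hsplit : (pvKeys pd).countP (fun o => (pvV pd o).contains x)
      = ((pvKeys pd).erase ds).countP (fun o => (pvV pd o).contains x) + 1 := by
    rw [hperm.countP_eq, List.countP_cons]
    have hc : (pvV pd ds).contains x = true := (PySem.Set.contains_iff _ _).mpr hx
    rw [hc]
    simp
  have hempty : ¬ x ∈ (PySem.Set.empty : PySem.Set String) := by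
    simp [PySem.Set.empty]
  constructor
  · intro hno
    have hzero : ((pvKeys pd).erase ds).countP (fun o => (pvV pd o).contains x) = 0 := by
      rw [List.countP_eq_zero]
      intro o ho
      have hmo := (List.Nodup.mem_erase_iff hkeys).mp ho
      intro hc
      exact hno (Or.inr ⟨o, hmo.2, hmo.1, (PySem.Set.contains_iff _ _).mp hc⟩)
    rw [hcx, hsplit, hzero]
    rfl
  · intro h1
    rintro (habs | ⟨o, ho, hne, hmem⟩)
    · exact hempty habs
    · have h1' : (pvL pd).count x = 1 := by exact_mod_cast h1
      have hzero : ((pvKeys pd).erase ds).countP (fun o => (pvV pd o).contains x) = 0 := by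
        rw [hcx, hsplit] at h1'
        omega
      have hoe : o ∈ (pvKeys pd).erase ds := (List.Nodup.mem_erase_iff hkeys).mpr ⟨hne, ho⟩
      exact (List.countP_eq_zero.mp hzero o hoe) ((PySem.Set.contains_iff _ _).mpr hmem)


theorem pv_V_nil (pd : List (String × List String)) {ds : String}
    (h : ds ∉ pvKeys pd) : pvV pd ds = [] := by
  unfold pvV
  apply PySem.Dict.getD_of_not_contains
  rw [← Bool.not_eq_true, PySem.Dict.contains_iff_mem_keys]
  exact h

-- ===== VERDICT (by name: the statement is the Claim_ definition above) =====
theorem compare_pattern_sets_spec : Claim_equal_compare_pattern_sets := by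
  intro pd hDom hPre
  obtain ⟨hk, hv⟩ := hPre
  unfold Spec_compare_pattern_sets compare_pattern_sets compare_pattern_sets_alt
  dsimp only
  rw [pv_counts_eq pd]
  congr 1
  congr 1
  · -- the unique_<ds> stage: pointwise equal functions
    funext acc ds
    congr 1
    by_cases hds : ds ∈ pvKeys pd
    · exact pv_unique pd hk hv hds
    · show PySem.Set.diff (pvV pd ds) _ = PySem.Set.ofList ((pvV pd ds).filter _)
      rw [pv_V_nil pd hds]
      rfl
  · -- the pairwise stage is identical; peel it, then the two guarded inserts
    congr 1
    split_ifs with h3 h2 h2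
    · congr 1
      · congr 1
        exact pv_common_all pd hv h2
      · exact pv_c3 pd hk hv
    · exact absurd (le_trans (by norm_num) h3) h2
    · congr 1
      exact pv_common_all pd hv h2
    · rfl
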